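-- pv_equiv track=rewrite | github.com/nvanva/MorphoBabushka | morpho_ru_eval/utils/official_evaluation.py | are_equal_tags
-- ===== SOURCE A (Python) =====
-- def get_cats_to_measure(pos):
--     if pos == "NOUN":
--         return ["Gender", "Number", "Case"]
--     elif pos == "ADJ":
--         return ["Gender", "Number", "Case", "Variant", "Degree"]
--     elif pos == "PRON":
--         return ["Gender", "Number", "Case"]
--     elif pos == "DET":
--         return ["Gender", "Number", "Case"]
--     elif pos == "VERB":
--         return ["Gender", "Number", "VerbForm", "Mood", "Tense"]
--     elif pos == "ADV":
--         return ["Degree"]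
--     elif pos == "NUM":
--         return ["Gender", "Case", "NumForm"]
--     else:
--         return []
--
-- VALUE_ALIASES = {'Brev': ["Short", "Brev"], 'Short': ["Short", "Brev"], "Notpast": ["Pres", "Fut"], "NumForm": ["Form"]}
--
-- def are_equal_tags(pos, first, second):
--     # all attrs which are both in true_attrs and attrs_to_measure for the current POS should present and have the same
--     # value in pred_attrs; pred_attrs can have any other attrs with any other values;
--     # it seems like returning Gender for Plural nouns / adjectives is not a problem!
--     cats_to_measure = get_cats_to_measure(pos)
--     for cat, value in first.items():
--         if cat in cats_to_measure:
--             second_value = second.get(cat)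
--             if not (second_value == value or second_value in VALUE_ALIASES.get(value, [])):  # Variant=Short is the same as Variant=Brev, etc.
--                 return False
--     return True
-- ===== SOURCE B (Python) =====
-- def get_cats_to_measure(pos):
--     if pos == "NOUN":
--         return ["Gender", "Number", "Case"]
--     elif pos == "ADJ":
--         return ["Gender", "Number", "Case", "Variant", "Degree"]
--     elif pos == "PRON":
--         return ["Gender", "Number", "Case"]
--     elif pos == "DET":
--         return ["Gender", "Number", "Case"]
--     elif pos == "VERB":
--         return ["Gender", "Number", "VerbForm", "Mood", "Tense"]
--     elif pos == "ADV":
--         return ["Degree"]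
--     elif pos == "NUM":
--         return ["Gender", "Case", "NumForm"]
--     else:
--         return []
--
-- VALUE_ALIASES = {'Brev': ["Short", "Brev"], 'Short': ["Short", "Brev"], "Notpast": ["Pres", "Fut"], "NumForm": ["Form"]}
--
-- def are_equal_tags(pos, first, second):
--     # Spine inverted: walk the fixed category list for this POS and look the
--     # categories up in `first`, instead of scanning all of `first` and
--     # filtering by category.
--     return all(
--         second.get(cat) == first[cat]
--         or second.get(cat) in VALUE_ALIASES.get(first[cat], [])
--         for cat in get_cats_to_measure(pos)
--         if cat in first
--     )
-- ===== Notes on version B (the rewrite author's own statement) =====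
-- stated objective: alternative
-- what changed: B inverts the traversal: instead of scanning every item of `first` and filtering by membership in the category list, B walks the fixed (at most 5-element) category list for the POS and looks each category up in `first`, expressed as a single all(...) over that list.
import Mathlib
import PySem

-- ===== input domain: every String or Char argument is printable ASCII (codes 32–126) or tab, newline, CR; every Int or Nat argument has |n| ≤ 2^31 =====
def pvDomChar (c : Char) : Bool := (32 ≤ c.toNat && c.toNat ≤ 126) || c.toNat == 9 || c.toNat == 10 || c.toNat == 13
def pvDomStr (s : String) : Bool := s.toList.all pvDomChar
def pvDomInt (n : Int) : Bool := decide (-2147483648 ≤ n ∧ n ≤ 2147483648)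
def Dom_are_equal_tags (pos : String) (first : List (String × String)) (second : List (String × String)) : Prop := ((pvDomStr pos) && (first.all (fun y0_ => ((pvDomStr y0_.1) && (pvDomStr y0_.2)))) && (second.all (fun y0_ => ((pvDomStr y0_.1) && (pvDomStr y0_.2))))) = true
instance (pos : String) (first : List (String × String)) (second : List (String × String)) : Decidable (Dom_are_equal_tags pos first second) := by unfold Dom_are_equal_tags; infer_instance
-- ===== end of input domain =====

-- B inverts the traversal spine: it walks the fixed category list for the POS and looks each
-- category up in `first`, instead of scanning all items of `first` and filtering by category.

-- ===== PORT A =====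
def get_cats_to_measure (pos : String) : List String :=
  if pos == "NOUN" then ["Gender", "Number", "Case"]
  else if pos == "ADJ" then ["Gender", "Number", "Case", "Variant", "Degree"]
  else if pos == "PRON" then ["Gender", "Number", "Case"]
  else if pos == "DET" then ["Gender", "Number", "Case"]
  else if pos == "VERB" then ["Gender", "Number", "VerbForm", "Mood", "Tense"]
  else if pos == "ADV" then ["Degree"]
  else if pos == "NUM" then ["Gender", "Case", "NumForm"]
  else []

def VALUE_ALIASES : PySem.Dict String (List String) :=
  PySem.Dict.ofList [("Brev", ["Short", "Brev"]), ("Short", ["Short", "Brev"]),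
                     ("Notpast", ["Pres", "Fut"]), ("NumForm", ["Form"])]

-- A's `for cat, value in first.items(): …` loop with its early `return False`
def areEqualTagsLoopA (cats_to_measure : List String) (secondD : PySem.Dict String String) :
    List (String × String) → Bool
  | [] => true
  | (cat, value) :: rest =>
    if cats_to_measure.contains cat then
      let second_value := secondD.get? cat
      if !(second_value == some value ||
           (match second_value with
            | some sv => (VALUE_ALIASES.getD value []).contains sv
            | none => false)) then
        false
      else areEqualTagsLoopA cats_to_measure secondD rest
    else areEqualTagsLoopA cats_to_measure secondD rest

def are_equal_tags (pos : String) (first : List (String × String)) (second : List (String × String)) : Bool :=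
  let cats_to_measure := get_cats_to_measure pos
  areEqualTagsLoopA cats_to_measure (PySem.Dict.ofList second) (PySem.Dict.ofList first).items

-- ===== PORT B =====
def are_equal_tags_alt (pos : String) (first : List (String × String)) (second : List (String × String)) : Bool :=
  let firstD := PySem.Dict.ofList first
  let secondD := PySem.Dict.ofList second
  (get_cats_to_measure pos).all fun cat =>
    match firstD.get? cat with
    | none => true
    | some value =>
        secondD.get? cat == some value ||
        (match secondD.get? cat with
         | some sv => (VALUE_ALIASES.getD value []).contains sv
         | none => false)

-- ===== PRECONDITION & SPEC =====
def Spec_are_equal_tags (pos : String) (first : List (String × String)) (second : List (String × String)) (out : Bool) : Prop := out = are_equal_tags_alt pos first second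
instance (pos : String) (first : List (String × String)) (second : List (String × String)) (out : Bool) : Decidable (Spec_are_equal_tags pos first second out) := by unfold Spec_are_equal_tags; infer_instance

-- ===== CLAIM (what is proved, stated in full; the proofs are below) =====
def Claim_equal_are_equal_tags : Prop := ∀ (pos : String) (first : List (String × String)) (second : List (String × String)), Dom_are_equal_tags pos first second → Spec_are_equal_tags pos first second (are_equal_tags pos first second)

-- ===== LEMMAS AND PROOFS =====

lemma areEqualTagsLoopA_eq_all (cats : List String) (sd : PySem.Dict String String)
    (l : List (String × String)) :
    areEqualTagsLoopA cats sd l =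
      l.all (fun p => !(cats.contains p.1) ||
        (sd.get? p.1 == some p.2 ||
         (match sd.get? p.1 with
          | some sv => (VALUE_ALIASES.getD p.2 []).contains sv
          | none => false))) := by
  induction l with
  | nil => rfl
  | cons p rest ih =>
    obtain ⟨cat, value⟩ := p
    simp only [areEqualTagsLoopA, List.all_cons]
    by_cases hc : cat ∈ cats
    · simp [hc, ih, beq_eq_decide]
    · simp [hc, ih]

theorem are_equal_tags_eq (pos : String) (first second : List (String × String)) :
    are_equal_tags pos first second = are_equal_tags_alt pos first second := by
  show areEqualTagsLoopA (get_cats_to_measure pos) (PySem.Dict.ofList second)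
        (PySem.Dict.ofList first).items = _
  rw [areEqualTagsLoopA_eq_all]
  simp only [are_equal_tags_alt]
  set cats := get_cats_to_measure pos
  set fd := PySem.Dict.ofList first
  set sd := PySem.Dict.ofList second
  have hnd : fd.keys.Nodup := PySem.Dict.nodup_keys_ofList first
  rw [Bool.eq_iff_iff]
  simp only [List.all_eq_true]
  constructor
  · intro h cat hcat
    cases hget : fd.get? cat with
    | none => simp
    | some value =>
      have hmem : (cat, value) ∈ fd.items := PySem.Dict.mem_items_of_get?_eq_some fd hget
      have h2 := h _ hmem
      simpa [hget, hcat] using h2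
  · intro h p hp
    obtain ⟨cat, value⟩ := p
    by_cases hc : cat ∈ cats
    · have hget : fd.get? cat = some value := PySem.Dict.get?_of_mem_items fd hp hnd
      have h2 := h cat hc
      rw [hget] at h2
      simp [hc]
      simpa using h2
    · simp [hc]

-- ===== VERDICT (by name: the statement is the Claim_ definition above) =====
theorem are_equal_tags_spec : Claim_equal_are_equal_tags := by
  intro pos first second _
  unfold Spec_are_equal_tags
  exact are_equal_tags_eq pos first second
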